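-- pv_equiv track=rewrite | github.com/Sauvi/vaultmind | rag_engine.py | _is_legal_term
-- ===== SOURCE A (Python) =====
-- def _is_legal_term(word: str) -> bool:
--     legal_terms = {
--         "liability", "indemnif", "terminat", "breach", "warrant",
--         "confidential", "intellectual", "property", "arbitration",
--         "governing", "jurisdiction", "penalty", "damages", "obligation",
--         "covenant", "represent", "disclaim", "payment", "clause",
--         "agreement", "contract", "party", "parties", "effective",
--         "expir", "renew", "notice", "default", "assign", "force",
--     }
--     return any(word.startswith(t) for t in legal_terms)
-- ===== SOURCE B (Python) =====
-- def _is_legal_term(word: str) -> bool: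
--     terms_by_len = {
--         5: {"party", "expir", "renew", "force"},
--         6: {"breach", "clause", "notice", "assign"},
--         7: {"warrant", "penalty", "damages", "payment", "parties", "default"},
--         8: {"indemnif", "terminat", "property", "covenant", "disclaim", "contract"},
--         9: {"liability", "governing", "represent", "agreement", "effective"},
--         10: {"obligation"},
--         11: {"arbitration"},
--         12: {"confidential", "intellectual", "jurisdiction"},
--     }
--     for n, group in terms_by_len.items():
--         if word[:n] in group:
--             return True
--     return False
-- ===== Notes on version B (the rewrite author's own statement) =====
-- stated objective: alternative
-- what changed: Instead of scanning all 30 terms and calling startswith on each, B keys the terms by length in a dict of sets and, for each of the 8 lengths, tests the word's prefix of that length for set membership.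
import Mathlib
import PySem

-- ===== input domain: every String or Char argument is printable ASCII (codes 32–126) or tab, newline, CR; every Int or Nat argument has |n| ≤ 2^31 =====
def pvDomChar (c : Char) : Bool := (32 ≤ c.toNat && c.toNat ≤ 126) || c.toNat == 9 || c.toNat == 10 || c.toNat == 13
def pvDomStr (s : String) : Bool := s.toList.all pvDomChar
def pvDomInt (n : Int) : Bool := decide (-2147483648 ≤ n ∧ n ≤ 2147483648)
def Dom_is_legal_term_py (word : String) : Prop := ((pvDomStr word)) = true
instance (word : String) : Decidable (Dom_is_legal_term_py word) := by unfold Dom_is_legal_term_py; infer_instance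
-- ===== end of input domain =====

-- B replaces A's startswith scan over the flat 30-term set with a dict keying the terms
-- by length; it probes the word's prefix of each of the 8 lengths against the matching
-- set (objective: alternative).

-- ===== PORT A =====
-- the literal set of legal terms from A (no duplicates; consumed only by order-insensitive `any`)
def pvLegalTerms : List String :=
  ["liability", "indemnif", "terminat", "breach", "warrant",
   "confidential", "intellectual", "property", "arbitration",
   "governing", "jurisdiction", "penalty", "damages", "obligation",
   "covenant", "represent", "disclaim", "payment", "clause",
   "agreement", "contract", "party", "parties", "effective",
   "expir", "renew", "notice", "default", "assign", "force"]

def is_legal_term_py (word : String) : Bool :=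
  (PySem.Set.ofList pvLegalTerms).any (fun t => PySem.Str.startswith word t)

-- ===== PORT B =====
-- B's literal dict: terms keyed by their length (each value a set literal)
def pvTermsByLen : List (Int × List String) :=
  [(5,  PySem.Set.ofList ["party", "expir", "renew", "force"]),
   (6,  PySem.Set.ofList ["breach", "clause", "notice", "assign"]),
   (7,  PySem.Set.ofList ["warrant", "penalty", "damages", "payment", "parties", "default"]),
   (8,  PySem.Set.ofList ["indemnif", "terminat", "property", "covenant", "disclaim", "contract"]),
   (9,  PySem.Set.ofList ["liability", "governing", "represent", "agreement", "effective"]),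
   (10, PySem.Set.ofList ["obligation"]),
   (11, PySem.Set.ofList ["arbitration"]),
   (12, PySem.Set.ofList ["confidential", "intellectual", "jurisdiction"])]

-- for n, group in terms_by_len.items(): if word[:n] in group: return True / return False
def pvByLenLoop (word : String) : List (Int × List String) → Bool
  | [] => false
  | (n, group) :: rest =>
      if PySem.Set.contains group (PySem.Str.slice word none (some n)) then true
      else pvByLenLoop word rest

def is_legal_term_py_alt (word : String) : Bool :=
  pvByLenLoop word pvTermsByLen

-- ===== PRECONDITION & SPEC =====
def Spec_is_legal_term_py (word : String) (out : Bool) : Prop := out = is_legal_term_py_alt word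
instance (word : String) (out : Bool) : Decidable (Spec_is_legal_term_py word out) := by unfold Spec_is_legal_term_py; infer_instance

-- ===== CLAIM (what is proved, stated in full; the proofs are below) =====
def Claim_equal_is_legal_term_py : Prop := ∀ (word : String), Dom_is_legal_term_py word → Spec_is_legal_term_py word (is_legal_term_py word)

-- ===== LEMMAS AND PROOFS =====

-- A's set literal contains no duplicates, so set(...) is the list itself
theorem pv_ofList_terms : PySem.Set.ofList pvLegalTerms = pvLegalTerms := by decide

-- the early-return loop of B is an existential over the table
theorem pvByLenLoop_eq_true_iff (word : String) (tbl : List (Int × List String)) :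
    pvByLenLoop word tbl = true ↔
      ∃ p ∈ tbl, PySem.Set.contains p.2 (PySem.Str.slice word none (some p.1)) = true := by
  induction tbl with
  | nil => simp [pvByLenLoop]
  | cons hd tl ih =>
      cases hd with
      | mk n g => simp [pvByLenLoop, ih]

-- every group member is a legal term of exactly the keyed length, and the keys are nonnegative
theorem pv_table_sound : ∀ p ∈ pvTermsByLen, 0 ≤ p.1 ∧
    ∀ t ∈ p.2, t ∈ pvLegalTerms ∧ (t.toList.length : Int) = p.1 := by decide

-- every legal term appears in the group keyed by its length
theorem pv_table_complete : ∀ t ∈ pvLegalTerms,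
    ∃ p ∈ pvTermsByLen, p.1 = (t.toList.length : Int) ∧ t ∈ p.2 := by decide

-- word[:n] as a List Char take, for 0 ≤ n
theorem pv_slice_toList (word : String) (n : Int) (hn : 0 ≤ n) :
    (PySem.Str.slice word none (some n)).toList = word.toList.take n.toNat := by
  simp [PySem.Str.toList_slice, PySem.List.slice_to _ hn]

-- A's side, extensionally: some term is a prefix of word
theorem is_legal_term_py_eq_true_iff (word : String) :
    is_legal_term_py word = true ↔ ∃ t ∈ pvLegalTerms, t.toList <+: word.toList := by
  unfold is_legal_term_py
  rw [pv_ofList_terms]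
  simp [List.any_eq_true, PySem.Chars.startswith_iff]

-- ===== VERDICT (by name: the statement is the Claim_ definition above) =====
theorem is_legal_term_py_spec : Claim_equal_is_legal_term_py := by
  intro word _
  unfold Spec_is_legal_term_py is_legal_term_py_alt
  rw [Bool.eq_iff_iff, is_legal_term_py_eq_true_iff, pvByLenLoop_eq_true_iff]
  constructor
  · rintro ⟨t, ht, hpre⟩
    obtain ⟨p, hp, hlen, htg⟩ := pv_table_complete t ht
    refine ⟨p, hp, ?_⟩
    have htake : t.toList = word.toList.take t.toList.length := List.prefix_iff_eq_take.mp hpre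
    have hs : (PySem.Str.slice word none (some p.1)).toList = word.toList.take t.toList.length := by
      rw [hlen, pv_slice_toList word _ (Int.natCast_nonneg _), Int.toNat_natCast]
    have heq : PySem.Str.slice word none (some p.1) = t :=
      String.toList_injective (hs.trans htake.symm)
    rw [heq]
    exact (PySem.Set.contains_iff _ _).mpr htg
  · rintro ⟨p, hp, hmem⟩
    obtain ⟨hn0, hall⟩ := pv_table_sound p hp
    have hm := (PySem.Set.contains_iff _ _).mp hmem
    obtain ⟨hterm, _⟩ := hall _ hm
    refine ⟨_, hterm, ?_⟩
    rw [pv_slice_toList word p.1 hn0]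
    exact List.take_prefix _ _
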